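-- pv_equiv track=rewrite | github.com/raindropsy/battleship_kane_vs_abel | Proj/Helper_functions.py | deduct_left_top
-- ===== SOURCE A (Python) =====
-- def deduct_left_top(coordinates, shortest_ship_length):
--     #create array to return
--     coordinates_array = []
--     deduct_answer = False
--
--     #for range of 1 - length of deduction
--     for i in range(1, shortest_ship_length):
--
--         #we derive the interested coordinates
--         coordinates = coordinates - i
--
--         #if value is 0 and above
--         if(coordinates > -1):
--
--             #we collate it in an array for return
--             coordinates_array.append(coordinates)
--
--     #if coordinates_array is still empty after
--     #the above operation
--     if(not coordinates_array or len(coordinates_array) < shortest_ship_length - 2):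
--
--         #This shows that cannot be deducted, index
--         #shldnt be used
--         deduct_answer = False
--     elif(len(coordinates_array) == shortest_ship_length - 1):
--
--         #Can be deducted, we return True
--         deduct_answer = True
--
--     #we return array
--     return deduct_answer
-- ===== SOURCE B (Python) =====
-- def deduct_left_top(coordinates, shortest_ship_length):
--     # Closed form: the loop subtracts 1+2+...+(L-1) cumulatively; the (strictly
--     # decreasing) intermediate values are all non-negative iff the final one is.
--     L = shortest_ship_length
--     return L >= 2 and coordinates >= L * (L - 1) // 2
-- ===== Notes on version B (the rewrite author's own statement) =====
-- stated objective: faster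
-- what changed: Replaced the O(L) cumulative-subtraction loop and list accumulation by the O(1) closed form: True iff L >= 2 and coordinates >= L*(L-1)//2 (the triangular number), using that the running value decreases strictly so all intermediates are non-negative iff the last is.
import Mathlib
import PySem

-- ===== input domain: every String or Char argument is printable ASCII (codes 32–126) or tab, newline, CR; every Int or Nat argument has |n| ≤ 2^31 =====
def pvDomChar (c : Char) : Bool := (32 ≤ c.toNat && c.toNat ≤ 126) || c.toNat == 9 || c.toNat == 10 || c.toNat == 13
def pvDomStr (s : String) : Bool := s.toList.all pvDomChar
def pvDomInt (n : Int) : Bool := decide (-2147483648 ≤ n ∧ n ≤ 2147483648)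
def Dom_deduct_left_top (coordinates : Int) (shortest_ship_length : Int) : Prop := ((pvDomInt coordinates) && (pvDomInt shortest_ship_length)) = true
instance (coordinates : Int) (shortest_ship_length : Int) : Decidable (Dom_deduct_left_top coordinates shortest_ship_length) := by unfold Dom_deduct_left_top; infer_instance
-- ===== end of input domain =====

-- B replaces A's O(L) cumulative-subtraction loop by the O(1) triangular-number closed form (objective: faster).

-- B replaces A's cumulative-subtraction loop by the triangular-number closed form (objective: faster).

-- ===== PORT A =====
-- one loop iteration: coordinates = coordinates - i; if coordinates > -1: append it
def deductStep (s : Int × List Int) (i : Int) : Int × List Int :=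
  let c := s.1 - i
  if c > -1 then (c, s.2 ++ [c]) else (c, s.2)

def deduct_left_top (coordinates : Int) (shortest_ship_length : Int) : Bool :=
  let st := (PySem.List.pyRange 1 shortest_ship_length 1).foldl deductStep (coordinates, [])
  if st.2 = [] ∨ (st.2.length : Int) < shortest_ship_length - 2 then false
  else if (st.2.length : Int) = shortest_ship_length - 1 then true
  else false

-- ===== PORT B =====
def deduct_left_top_alt (coordinates : Int) (shortest_ship_length : Int) : Bool :=
  decide (2 ≤ shortest_ship_length) &&
  decide (PySem.Int.floordiv (shortest_ship_length * (shortest_ship_length - 1)) 2 ≤ coordinates)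

-- ===== PRECONDITION & SPEC =====
def Spec_deduct_left_top (coordinates : Int) (shortest_ship_length : Int) (out : Bool) : Prop := out = deduct_left_top_alt coordinates shortest_ship_length
instance (coordinates : Int) (shortest_ship_length : Int) (out : Bool) : Decidable (Spec_deduct_left_top coordinates shortest_ship_length out) := by unfold Spec_deduct_left_top; infer_instance

-- ===== CLAIM (what is proved, stated in full; the proofs are below) =====
def Claim_equal_deduct_left_top : Prop := ∀ (coordinates : Int) (shortest_ship_length : Int), Dom_deduct_left_top coordinates shortest_ship_length → Spec_deduct_left_top coordinates shortest_ship_length (deduct_left_top coordinates shortest_ship_length)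

-- ===== LEMMAS AND PROOFS =====

-- Characterization of A's loop for n ≥ 2: the array reaches full length n-1 exactly
-- when the triangular number n(n-1)/2 is at most c.
theorem deduct_loop_char (n : Nat) (hn : 2 ≤ n) (c : Int) :
    ((PySem.List.pyRange 1 (n : Int) 1).foldl deductStep (c, [])).1
      = c - ((n * (n - 1) / 2 : Nat) : Int) ∧
    (((n * (n - 1) / 2 : Nat) : Int) ≤ c →
      ((PySem.List.pyRange 1 (n : Int) 1).foldl deductStep (c, [])).2.length = n - 1) ∧
    (c < ((n * (n - 1) / 2 : Nat) : Int) →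
      ((PySem.List.pyRange 1 (n : Int) 1).foldl deductStep (c, [])).2.length < n - 1) := by
  induction n with
  | zero => omega
  | succ m ih =>
    rcases Nat.lt_or_ge m 2 with hm | hm
    · -- base case: m + 1 = 2
      interval_cases m
      · omega
      · have h2 : ((2 : Nat) : Int) = (2 : Int) := by norm_num
        rw [h2]
        have hr : PySem.List.pyRange 1 2 1 = [1] := by decide
        rw [hr]
        simp only [List.foldl, deductStep]
        by_cases hc : c - 1 > -1
        · simp [hc]; omega
        · simp [hc]; omega
    · -- inductive step: m ≥ 2
      have hIH := ih hm
      have e1 : (m + 1) * (m + 1 - 1) = m * (m - 1) + 2 * m := by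
        obtain ⟨k, rfl⟩ := Nat.exists_eq_add_of_le hm
        simp
        ring
      have hsplit : PySem.List.pyRange 1 ((m + 1 : Nat) : Int) 1
          = PySem.List.pyRange 1 (m : Int) 1 ++ [(m : Int)] := by
        have hcast : ((m + 1 : Nat) : Int) = (m : Int) + 1 := by push_cast; ring
        rw [hcast, PySem.List.pyRange_one_succ_right (by exact_mod_cast Nat.one_le_of_lt hm)]
      rw [hsplit, List.foldl_append]
      obtain ⟨h1, h2, h3⟩ := hIH
      have hmc : ((m * (m - 1) : Nat) : Int) = (m : Int) * ((m - 1 : Nat) : Int) := by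
        push_cast; ring
      have hInt : ((m : Int) + 1) * (m : Int)
          = (m : Int) * ((m - 1 : Nat) : Int) + 2 * ((m - 1 : Nat) : Int) + 2 := by
        have hsub : ((m - 1 : Nat) : Int) = (m : Int) - 1 := by omega
        rw [hsub]; ring
      set st := (PySem.List.pyRange 1 (m : Int) 1).foldl deductStep (c, []) with hst
      simp only [List.foldl, deductStep]
      by_cases hc : st.1 - (m : Int) > -1
      · have hgem : ((m * (m - 1) / 2 : Nat) : Int) ≤ c := by omega
        have hlen := h2 hgem
        simp [hc, hlen]
        refine ⟨by omega, by omega, by omega⟩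
      · simp [hc]
        refine ⟨by omega, by omega, ?_⟩
        intro _
        by_cases h : c < ((m * (m - 1) / 2 : Nat) : Int)
        · have := h3 h; omega
        · rw [not_lt] at h; have := h2 h; omega

-- ===== VERDICT (by name: the statement is the Claim_ definition above) =====
theorem deduct_left_top_spec : Claim_equal_deduct_left_top := by
  intro c L _dom
  unfold Spec_deduct_left_top deduct_left_top deduct_left_top_alt
  by_cases hL : L < 2
  · -- L ≤ 1: the loop never runs, the array stays empty, both sides are false
    rw [PySem.List.pyRange_one_eq_nil (by omega)]
    simp [hL]
  · rw [not_lt] at hL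
    set n := L.toNat with hn
    have hLn : L = (n : Int) := by omega
    have hn2 : 2 ≤ n := by omega
    obtain ⟨h1, h2, h3⟩ := deduct_loop_char n hn2 c
    have hfd : PySem.Int.floordiv (L * (L - 1)) 2 = ((n * (n - 1) / 2 : Nat) : Int) := by
      have hX : L * (L - 1) = ((n * (n - 1) : Nat) : Int) := by
        rw [hLn]; push_cast [Nat.cast_sub (by omega : 1 ≤ n)]; ring
      rw [hX]
      exact_mod_cast PySem.Int.floordiv_natCast (n * (n - 1)) 2
    rw [hLn] at *
    by_cases hc : c < ((n * (n - 1) / 2 : Nat) : Int)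
    · -- below the triangular number: both false
      have hlen := h3 hc
      have hne : ¬ (((PySem.List.pyRange 1 (n : Int) 1).foldl deductStep (c, [])).2.length : Int)
          = (n : Int) - 1 := by omega
      simp only [hfd]
      simp [hne]
      omega
    · -- at or above it: both true
      rw [not_lt] at hc
      have hlen := h2 hc
      have hne : ((PySem.List.pyRange 1 (n : Int) 1).foldl deductStep (c, [])).2 ≠ [] := by
        intro h
        rw [h] at hlen
        simp at hlen
        omega
      have hA : ((n - 1 : Nat) : Int) = (n : Int) - 1 := by omega
      simp [hne, hlen, hA, (by omega : (2 : Int) ≤ (n : Int))]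
      have hEdiv : ((n : Int) * ((n : Int) - 1)) / 2 = ((n * (n - 1) / 2 : Nat) : Int) := by
        rw [show (n : Int) * ((n : Int) - 1) = ((n * (n - 1) : Nat) : Int) by
              push_cast [Nat.cast_sub (by omega : 1 ≤ n)]; ring,
            show (2 : Int) = ((2 : Nat) : Int) by norm_num]
        exact (Int.natCast_div _ _).symm
      rw [hEdiv]
      exact hc
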